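-- pv_equiv track=rewrite | github.com/alexmarinos87/leetcode-solutions | 2263-maximum-running-time-of-n-computers/solution.py | maxRunTime
-- ===== SOURCE A (Python) =====
-- from typing import List
--
-- def maxRunTime(n: int, batteries: List[int]) -> int:
--     def can_run(T: int) -> bool:
--         total = 0
--         for b in batteries:
--             total += min(b, T)
--             # Small optimisation: early exit if already enough
--             if total >= n * T:
--                 return True
--         return total >= n * T
--
--     total_energy = sum(batteries)
--     low, high = 0, total_energy // n # max possible minutes
--
--     while low < high:
--         mid = (low + high +1) // 2 # bias upward
--         if can_run(mid):
--             low = mid # mid is feasible try for more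
--         else:
--             high = mid - 1 # mid not feasible go smaller
--
--     return low
-- ===== SOURCE B (Python) =====
-- def maxRunTime(n, batteries):
--     total = sum(batteries)
--     k = n
--     for b in sorted(batteries, reverse=True):
--         if b <= total // k:
--             break
--         total -= b
--         k -= 1
--     return total // k
-- ===== Notes on version B (the rewrite author's own statement) =====
-- stated objective: alternative
-- what changed: Replaced the binary search over the answer (with a feasibility scan per probe) by the standard single-pass sort+greedy: sort batteries descending, dedicate each battery larger than total//k to one machine, return total//k.
-- outside the precondition, e.g. on maxRunTime(4, [-4]): A returns 0, B returns -1; on maxRunTime(1, [-3, 4]): A returns 0, B raises ZeroDivisionError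
import Mathlib
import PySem

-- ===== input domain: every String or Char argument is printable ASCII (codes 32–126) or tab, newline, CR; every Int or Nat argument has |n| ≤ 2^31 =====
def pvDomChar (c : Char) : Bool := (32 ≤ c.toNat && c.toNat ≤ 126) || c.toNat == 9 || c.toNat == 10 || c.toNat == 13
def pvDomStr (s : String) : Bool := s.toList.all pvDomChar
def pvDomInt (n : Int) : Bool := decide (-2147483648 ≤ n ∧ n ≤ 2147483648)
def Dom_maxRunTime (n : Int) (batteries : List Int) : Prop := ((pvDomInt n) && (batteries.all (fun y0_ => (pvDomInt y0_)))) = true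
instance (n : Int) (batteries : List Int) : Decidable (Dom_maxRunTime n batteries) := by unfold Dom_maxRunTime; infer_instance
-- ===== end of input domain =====

-- B replaces A's binary search on the answer by the standard sort+greedy pass; equal on the
-- natural domain (n ≥ 1, nonnegative batteries).

-- ===== PORT A =====
-- inner helper can_run(T): total accumulates min(b, T) with an early `return True`
def canRunLoop (n T : Int) : List Int → Int → Bool
  | [], total => decide (n * T ≤ total)
  | b :: rest, total =>
    if n * T ≤ total + min b T then true
    else canRunLoop n T rest (total + min b T)

-- midpoint bounds, cited by bsLoop's decreasing_by
theorem pvMidBounds (low high : Int) (h : low < high) :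
    low < PySem.Int.floordiv (low + high + 1) 2 ∧
      PySem.Int.floordiv (low + high + 1) 2 ≤ high := by
  rw [PySem.Int.floordiv_eq_ediv_of_pos (by omega)]
  omega

-- the `while low < high` loop of A
def bsLoop (n : Int) (batteries : List Int) (low high : Int) : Int :=
  if h : low < high then
    if canRunLoop n (PySem.Int.floordiv (low + high + 1) 2) batteries 0 then
      bsLoop n batteries (PySem.Int.floordiv (low + high + 1) 2) high
    else
      bsLoop n batteries low (PySem.Int.floordiv (low + high + 1) 2 - 1)
  else low
termination_by (high - low).toNat
decreasing_by
  · have := pvMidBounds low high h; omega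
  · have := pvMidBounds low high h; omega

def maxRunTime (n : Int) (batteries : List Int) : Int :=
  bsLoop n batteries 0 (PySem.Int.floordiv batteries.sum n)

-- ===== PORT B =====
-- the `for b in sorted(batteries, reverse=True)` loop with its break
def peel (total k : Int) : List Int → Int
  | [] => PySem.Int.floordiv total k
  | b :: rest =>
    if b ≤ PySem.Int.floordiv total k then PySem.Int.floordiv total k
    else peel (total - b) (k - 1) rest

def maxRunTime_alt (n : Int) (batteries : List Int) : Int :=
  peel batteries.sum n (PySem.List.sorted batteries (fun x => x) true)

-- ===== PRECONDITION & SPEC =====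
-- Pre_ restricts to nonnegative battery charges (the problem's natural domain) and n ≠ 0
-- (n = 0 makes A raise ZeroDivisionError).  On negative charges A's value is an accident of
-- its early-exit feasibility scan, and B may return a different value or raise there.
def Pre_maxRunTime (n : Int) (batteries : List Int) : Prop :=
  n ≠ 0 ∧ ∀ b ∈ batteries, 0 ≤ b
instance (n : Int) (batteries : List Int) : Decidable (Pre_maxRunTime n batteries) := by
  unfold Pre_maxRunTime; infer_instance

def pvWitness_maxRunTime : Int × List Int := (2, [3, 7, 5])

def Spec_maxRunTime (n : Int) (batteries : List Int) (out : Int) : Prop := out = maxRunTime_alt n batteries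
instance (n : Int) (batteries : List Int) (out : Int) : Decidable (Spec_maxRunTime n batteries out) := by unfold Spec_maxRunTime; infer_instance

-- ===== CLAIM (what is proved, stated in full; the proofs are below) =====
def Claim_equal_maxRunTime : Prop := ∀ (n : Int) (batteries : List Int), Dom_maxRunTime n batteries → Pre_maxRunTime n batteries → Spec_maxRunTime n batteries (maxRunTime n batteries)

-- ===== LEMMAS AND PROOFS =====

-- total supplied energy when every battery is capped at T
def pvS (xs : List Int) (T : Int) : Int := (xs.map (fun b => min b T)).sum

-- feasibility: n machines can all run for T minutes
def pvCan (n : Int) (xs : List Int) (T : Int) : Prop := n * T ≤ pvS xs T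

theorem pvS_cons (b T : Int) (xs : List Int) : pvS (b :: xs) T = min b T + pvS xs T := by
  simp [pvS]

theorem pvS_append (xs ys : List Int) (T : Int) : pvS (xs ++ ys) T = pvS xs T + pvS ys T := by
  simp [pvS]

theorem pvS_perm {xs ys : List Int} (h : xs.Perm ys) (T : Int) : pvS xs T = pvS ys T :=
  (h.map _).sum_eq

theorem pvS_nonneg {xs : List Int} {T : Int} (hx : ∀ b ∈ xs, 0 ≤ b) (hT : 0 ≤ T) :
    0 ≤ pvS xs T := by
  induction xs with
  | nil => simp [pvS]
  | cons b rest ih =>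
    have hb := hx b (by simp)
    have := ih (fun x hx' => hx x (by simp [hx']))
    rw [pvS_cons]
    have : 0 ≤ min b T := le_min hb hT
    omega

theorem pvS_le_sum (xs : List Int) (T : Int) : pvS xs T ≤ xs.sum := by
  induction xs with
  | nil => simp [pvS]
  | cons b rest ih =>
    rw [pvS_cons, List.sum_cons]
    have : min b T ≤ b := min_le_left _ _
    omega

theorem pvS_le_len_mul (xs : List Int) (T : Int) : pvS xs T ≤ (xs.length : Int) * T := by
  induction xs with
  | nil => simp [pvS]
  | cons b rest ih =>
    rw [pvS_cons, List.length_cons]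
    have : min b T ≤ T := min_le_right _ _
    push_cast
    nlinarith

theorem pvS_of_all_ge {xs : List Int} {T : Int} (h : ∀ x ∈ xs, T ≤ x) :
    pvS xs T = (xs.length : Int) * T := by
  induction xs with
  | nil => simp [pvS]
  | cons b rest ih =>
    have hb := h b (by simp)
    rw [pvS_cons, ih (fun x hx => h x (by simp [hx])), min_eq_right hb, List.length_cons]
    push_cast; ring

theorem pvS_of_all_le {xs : List Int} {T : Int} (h : ∀ x ∈ xs, x ≤ T) :
    pvS xs T = xs.sum := by
  induction xs with
  | nil => simp [pvS]
  | cons b rest ih =>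
    rw [pvS_cons, ih (fun x hx => h x (by simp [hx])), min_eq_left (h b (by simp)),
      List.sum_cons]

theorem pvS_mul_mono {xs : List Int} {T T' : Int} (hx : ∀ b ∈ xs, 0 ≤ b)
    (hT' : 0 ≤ T') (hTT : T' ≤ T) : pvS xs T * T' ≤ pvS xs T' * T := by
  induction xs with
  | nil => simp [pvS]
  | cons b rest ih =>
    have hb := hx b (by simp)
    have ih' := ih (fun x hx' => hx x (by simp [hx']))
    rw [pvS_cons, pvS_cons, add_mul, add_mul]
    have hpt : min b T * T' ≤ min b T' * T := by
      rcases le_total b T' with h1 | h1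
      · rw [min_eq_left (le_trans h1 hTT), min_eq_left h1]
        nlinarith
      · rw [min_eq_right h1]
        rcases le_total b T with h2 | h2
        · rw [min_eq_left h2]; nlinarith
        · rw [min_eq_right h2]; nlinarith
    omega

theorem pvCan_mono {n : Int} {xs : List Int} {T T' : Int} (hx : ∀ b ∈ xs, 0 ≤ b)
    (hT' : 0 ≤ T') (hTT : T' ≤ T) (hc : pvCan n xs T) : pvCan n xs T' := by
  unfold pvCan at *
  rcases lt_or_eq_of_le (le_trans hT' hTT) with hpos | hzero
  · have h1 : n * T * T' ≤ pvS xs T * T' := by nlinarith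
    have h2 := pvS_mul_mono hx hT' hTT
    have : n * T' * T ≤ pvS xs T' * T := by nlinarith
    exact le_of_mul_le_mul_right this hpos
  · have hT0 : T' = 0 := by omega
    subst hT0
    simpa using pvS_nonneg hx le_rfl

-- A's can_run equals the feasibility predicate (nonnegative batteries, T ≥ 0)
theorem canRunLoop_eq {n T : Int} {xs : List Int} (hx : ∀ b ∈ xs, 0 ≤ b) (hT : 0 ≤ T) :
    ∀ acc : Int, (canRunLoop n T xs acc = true ↔ n * T ≤ acc + pvS xs T) := by
  induction xs with
  | nil => intro acc; simp [canRunLoop, pvS]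
  | cons b rest ih =>
    intro acc
    have hb := hx b (by simp)
    have hrest : ∀ x ∈ rest, 0 ≤ x := fun x hx' => hx x (by simp [hx'])
    rw [pvS_cons]
    simp only [canRunLoop]
    split_ifs with h
    · simp only [true_iff]
      have : 0 ≤ pvS rest T := pvS_nonneg hrest hT
      omega
    · rw [ih hrest (acc + min b T)]
      constructor <;> intro <;> omega

-- A's binary search: from the invariant can(low) ∧ ¬can(high+1) it returns the threshold
theorem bsLoop_spec (n : Int) (xs : List Int) (hx : ∀ b ∈ xs, 0 ≤ b) :
    ∀ (m : Nat) (low high : Int), (high - low).toNat ≤ m → 0 ≤ low → low ≤ high →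
      pvCan n xs low → ¬ pvCan n xs (high + 1) →
      0 ≤ bsLoop n xs low high ∧ pvCan n xs (bsLoop n xs low high) ∧
        ¬ pvCan n xs (bsLoop n xs low high + 1) := by
  intro m
  induction m with
  | zero =>
    intro low high hm h0 hlh hcl hch
    have : low = high := by omega
    subst this
    rw [bsLoop]
    simp only [lt_irrefl, dite_false]
    exact ⟨h0, hcl, hch⟩
  | succ m ih =>
    intro low high hm h0 hlh hcl hch
    rw [bsLoop]
    by_cases hlt : low < high
    · simp only [hlt, dite_true]
      have hmid := pvMidBounds low high hlt
      set mid := PySem.Int.floordiv (low + high + 1) 2 with hmiddef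
      by_cases hc : canRunLoop n mid xs 0 = true
      · simp only [hc, if_true]
        have hcanmid : pvCan n xs mid := by
          have := (canRunLoop_eq hx (by omega) 0).mp hc
          unfold pvCan; omega
        exact ih mid high (by omega) (by omega) (by omega) hcanmid hch
      · simp only [hc]
        have hncanmid : ¬ pvCan n xs mid := by
          intro hcan
          exact hc ((canRunLoop_eq hx (by omega) 0).mpr (by unfold pvCan at hcan; omega))
        have := ih low (mid - 1) (by omega) h0 (by omega) hcl (by
          simpa using hncanmid)
        simpa using this
    · simp only [hlt, dite_false]
      have : low = high := by omega
      subst this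
      exact ⟨h0, hcl, hch⟩

-- B's greedy peel: with p the already-dedicated batteries (each exceeding the current
-- quotient), d sorted descending, it returns the threshold of the same feasibility predicate
theorem peel_spec (n : Int) :
    ∀ (d p : List Int), d.Pairwise (fun a b => b ≤ a) → (∀ x ∈ d, 0 ≤ x) →
      (∀ x ∈ p, 0 ≤ x) → ∀ k : Int, 1 ≤ k → k = n - (p.length : Int) →
      (∀ x ∈ p, PySem.Int.floordiv d.sum k < x) →
      0 ≤ peel d.sum k d ∧ pvCan n (p ++ d) (peel d.sum k d) ∧
        ¬ pvCan n (p ++ d) (peel d.sum k d + 1) := by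
  intro d
  induction d with
  | nil =>
    intro p _ _ hp k hk hkn hpq
    have hs : (([] : List Int)).sum = 0 := rfl
    rw [hs] at hpq ⊢
    simp only [peel]
    have hq0 : PySem.Int.floordiv 0 k = 0 := by
      rw [PySem.Int.floordiv_eq_ediv_of_pos (by omega)]; simp
    rw [hq0] at hpq ⊢
    refine ⟨le_rfl, ?_, ?_⟩
    · unfold pvCan
      have := pvS_nonneg (xs := p ++ []) (T := 0) (by simpa using hp) le_rfl
      omega
    · unfold pvCan
      have h1 : pvS (p ++ []) 1 ≤ ((p ++ []).length : Int) * 1 := pvS_le_len_mul _ _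
      simp only [List.append_nil] at h1 ⊢
      have hlen : (p.length : Int) = n - k := by omega
      intro hcon
      simp only [zero_add] at hcon
      linarith
  | cons b rest ihd =>
    intro p hsort hd hp k hk hkn hpq
    have hb : 0 ≤ b := hd b (by simp)
    have hrest : ∀ x ∈ rest, 0 ≤ x := fun x hx => hd x (by simp [hx])
    have hsum : 0 ≤ (b :: rest).sum := List.sum_nonneg hd
    have hrsum : 0 ≤ rest.sum := List.sum_nonneg hrest
    set q := PySem.Int.floordiv (b :: rest).sum k with hqdef
    have hqk : q * k ≤ (b :: rest).sum ∧ (b :: rest).sum < (q + 1) * k :=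
      (PySem.Int.floordiv_eq_iff_of_pos (by omega : (0:Int) < k)).mp hqdef.symm
    have hq0 : 0 ≤ q := by nlinarith [hqk.1, hqk.2]
    simp only [peel, ← hqdef]
    by_cases hstop : b ≤ q
    · rw [if_pos hstop]
      have hall : ∀ y ∈ b :: rest, y ≤ q := by
        intro y hy
        rcases List.mem_cons.mp hy with h | h
        · omega
        · have := (List.pairwise_cons.mp hsort).1 y h; omega
      have hSp : pvS p q = (p.length : Int) * q := pvS_of_all_ge (fun x hx => by
        have := hpq x hx; omega)
      have hSd : pvS (b :: rest) q = (b :: rest).sum := pvS_of_all_le hall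
      refine ⟨hq0, ?_, ?_⟩
      · unfold pvCan
        rw [pvS_append, hSp, hSd]
        have hlen : (p.length : Int) = n - k := by omega
        nlinarith [hqk.1]
      · unfold pvCan
        rw [pvS_append]
        have h1 : pvS p (q + 1) ≤ (p.length : Int) * (q + 1) := pvS_le_len_mul _ _
        have h2 : pvS (b :: rest) (q + 1) ≤ (b :: rest).sum := pvS_le_sum _ _
        have hlen : (p.length : Int) = n - k := by omega
        intro hcon
        nlinarith [hqk.2]
    · rw [if_neg hstop]
      have hbq : q < b := by omega
      -- k = 1 is impossible here: b would exceed the total it is part of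
      have hk2 : 2 ≤ k := by
        rcases lt_or_eq_of_le hk with h | h
        · omega
        · exfalso
          have : q = (b :: rest).sum := by nlinarith [hqk.1, hqk.2]
          simp only [List.sum_cons] at this
          omega
      have hsc : (b :: rest).sum = b + rest.sum := List.sum_cons
      -- the new quotient does not exceed the old one
      have hq' : PySem.Int.floordiv rest.sum (k - 1) ≤ q := by
        have hlt : PySem.Int.floordiv rest.sum (k - 1) < q + 1 := by
          rw [PySem.Int.floordiv_lt_iff_lt_mul (by omega : (0:Int) < k - 1)]
          nlinarith [hqk.2]
        omega
      have := ihd (p ++ [b]) (List.pairwise_cons.mp hsort).2 hrest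
        (by intro x hx; rcases List.mem_append.mp hx with h | h
            · exact hp x h
            · simp at h; omega)
        (k - 1) (by omega) (by simp; omega)
        (by intro x hx
            rcases List.mem_append.mp hx with h | h
            · have := hpq x h; omega
            · simp at h; omega)
      rw [show (b :: rest).sum - b = rest.sum by rw [hsc]; ring]
      simpa [List.append_assoc] using this

-- a nonnegative total floor-divided by a negative count is nonpositive
theorem pvFd_nonpos (a b : Int) (ha : 0 ≤ a) (hb : b < 0) : PySem.Int.floordiv a b ≤ 0 := by
  have h1 := PySem.Int.floordiv_mul_add_mod a b
  have h2 := PySem.Int.mod_neg_bounds (a := a) hb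
  nlinarith [h1, h2.1, h2.2]

-- with a negative computer count, B's peel returns 0 on nonnegative batteries
theorem peel_neg : ∀ (d : List Int), (∀ x ∈ d, 0 ≤ x) → ∀ k : Int, k < 0 → peel d.sum k d = 0
  | [], _, k, _ => by simp [peel, PySem.Int.floordiv]
  | b :: rest, hd, k, hk => by
    simp only [peel]
    have hb := hd b (by simp)
    have hrest : ∀ x ∈ rest, 0 ≤ x := fun x hx => hd x (by simp [hx])
    have hsum : 0 ≤ (b :: rest).sum := List.sum_nonneg hd
    have hq := pvFd_nonpos (b :: rest).sum k hsum hk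
    by_cases hstop : b ≤ PySem.Int.floordiv (b :: rest).sum k
    · rw [if_pos hstop]; omega
    · rw [if_neg hstop]
      rw [show (b :: rest).sum - b = rest.sum by rw [List.sum_cons]; ring]
      exact peel_neg rest hrest (k - 1) (by omega)

-- uniqueness of the threshold under downward closure
theorem pvThreshold_unique {n : Int} {xs : List Int} (hx : ∀ b ∈ xs, 0 ≤ b)
    {r g : Int} (hr0 : 0 ≤ r) (hrc : pvCan n xs r) (hrn : ¬ pvCan n xs (r + 1))
    (hg0 : 0 ≤ g) (hgc : pvCan n xs g) (hgn : ¬ pvCan n xs (g + 1)) : r = g := by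
  rcases lt_trichotomy r g with h | h | h
  · exact absurd (pvCan_mono hx (by omega) (by omega) hgc) hrn
  · exact h
  · exact absurd (pvCan_mono hx (by omega) (by omega) hrc) hgn

-- ===== VERDICT (by name: the statement is the Claim_ definition above) =====
theorem maxRunTime_spec : Claim_equal_maxRunTime := by
  intro n batteries _ hpre
  obtain ⟨hn0, hx⟩ := hpre
  unfold Spec_maxRunTime maxRunTime maxRunTime_alt
  set D := PySem.List.sorted batteries (fun x => x) true with hDdef
  have hperm : D.Perm batteries := PySem.List.sorted_perm _ _ _
  have hDx : ∀ x ∈ D, 0 ≤ x := fun x hxm => hx x (hperm.mem_iff.mp hxm)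
  have hDsort : D.Pairwise (fun a b => b ≤ a) := by
    have := PySem.List.sorted_pairwise_rev (xs := batteries) (key := fun x => x)
    simpa using this
  have hDsum : D.sum = batteries.sum := hperm.sum_eq
  have hsum0 : 0 ≤ batteries.sum := List.sum_nonneg hx
  rcases lt_or_gt_of_ne hn0 with hneg | hpos
  · -- a negative computer count: both programs return 0
    have hfd := pvFd_nonpos batteries.sum n hsum0 hneg
    have hA : bsLoop n batteries 0 (PySem.Int.floordiv batteries.sum n) = 0 := by
      rw [bsLoop, dif_neg (by omega)]
    have hB : peel batteries.sum n D = 0 := by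
      rw [← hDsum]; exact peel_neg D hDx n hneg
    rw [hA, hB]
  have hn : 1 ≤ n := hpos
  -- A's side
  set high := PySem.Int.floordiv batteries.sum n with hhighdef
  have hhbr : high * n ≤ batteries.sum ∧ batteries.sum < (high + 1) * n :=
    (PySem.Int.floordiv_eq_iff_of_pos (by omega : (0:Int) < n)).mp hhighdef.symm
  have hhigh0 : 0 ≤ high := by nlinarith [hhbr.1, hhbr.2]
  have hcan0 : pvCan n batteries 0 := by
    unfold pvCan
    have := pvS_nonneg hx (le_refl (0 : Int))
    omega
  have hnch : ¬ pvCan n batteries (high + 1) := by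
    unfold pvCan
    have := pvS_le_sum batteries (high + 1)
    intro hcon
    nlinarith [hhbr.2]
  have hA := bsLoop_spec n batteries hx (high - 0).toNat 0 high le_rfl le_rfl hhigh0
    hcan0 hnch
  -- B's side
  have hB := peel_spec n D [] hDsort hDx (by simp) n hn (by simp) (by simp)
  rw [hDsum] at hB
  simp only [List.nil_append] at hB
  have hBsum : ∀ T, pvCan n D T ↔ pvCan n batteries T := by
    intro T; unfold pvCan; rw [pvS_perm hperm]
  exact pvThreshold_unique hx hA.1 hA.2.1 hA.2.2 hB.1 ((hBsum _).mp hB.2.1)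
    (fun hcon => hB.2.2 ((hBsum _).mpr hcon))
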